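-- pv_equiv track=rewrite | github.com/hetankevin/mixMC | .ipynb_checkpoints/experiments-checkpoint.py | nba_prefix_trail
-- ===== SOURCE A (Python) =====
-- def nba_prefix_trail(trail_ct, t):
--     trail_ct_prefix = []
--     total_time = 0
--     for player, time in trail_ct:
--         if total_time + time < t:
--             trail_ct_prefix.append((player, time))
--         else:
--             trail_ct_prefix.append((player, t - total_time))
--             break
--         total_time += time
--     return trail_ct_prefix
-- ===== SOURCE B (Python) =====
-- def nba_prefix_trail(trail_ct, t):
--     trail_ct = list(trail_ct)
--     times = [time for _, time in trail_ct]
--     cums = []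
--     s = 0
--     for x in times:
--         s += x
--         cums.append(s)
--     split = next((i for i, c in enumerate(cums) if c >= t), None)
--     if split is None:
--         return trail_ct
--     total_before = cums[split] - times[split]
--     return trail_ct[:split] + [(trail_ct[split][0], t - total_before)]
-- ===== Notes on version B (the rewrite author's own statement) =====
-- stated objective: alternative
-- what changed: Replaces the single accumulate-and-break loop by a two-pass decomposition: compute the prefix-sum list, locate the first index whose cumulative time reaches t, and assemble the result by slicing plus one truncated pair (copy of the whole list if no index crosses).
import Mathlib
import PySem

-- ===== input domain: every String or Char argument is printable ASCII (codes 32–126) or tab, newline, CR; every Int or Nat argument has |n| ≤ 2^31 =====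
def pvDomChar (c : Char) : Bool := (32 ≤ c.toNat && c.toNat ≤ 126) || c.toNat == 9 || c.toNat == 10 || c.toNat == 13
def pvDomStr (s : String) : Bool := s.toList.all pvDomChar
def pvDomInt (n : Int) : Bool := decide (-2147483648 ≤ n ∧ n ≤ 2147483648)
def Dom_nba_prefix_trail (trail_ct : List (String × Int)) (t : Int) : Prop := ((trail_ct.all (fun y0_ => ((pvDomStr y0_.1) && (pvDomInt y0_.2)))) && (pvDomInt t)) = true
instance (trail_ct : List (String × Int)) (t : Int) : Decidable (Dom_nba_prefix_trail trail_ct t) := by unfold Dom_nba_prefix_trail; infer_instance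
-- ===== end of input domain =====

-- B replaces A's accumulate-and-break loop by a two-pass decomposition (prefix sums, find split index, slice + one truncated pair); objective: alternative structure, same O(n) cost.


-- ===== PORT A =====
-- A's for-loop with break, as structural recursion over the list carrying total_time
def pvGoA : List (String × Int) → Int → Int → List (String × Int)
  | [], _, _ => []
  | (player, time) :: rest, total_time, t =>
    if total_time + time < t then
      (player, time) :: pvGoA rest (total_time + time) t
    else
      [(player, t - total_time)]

def nba_prefix_trail (trail_ct : List (String × Int)) (t : Int) : List (String × Int) :=
  pvGoA trail_ct 0 t

-- ===== PORT B =====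
-- running sums of the times (Python's cums list, built by the second loop in Source B)
def pvCumsFrom : Int → List Int → List Int
  | _, [] => []
  | s, x :: xs => (s + x) :: pvCumsFrom (s + x) xs

-- next((i for i, c in enumerate(cums) if c >= t), None)
def pvFindSplit (t : Int) : List Int → Option Nat
  | [] => none
  | c :: cs => if t ≤ c then some 0 else (pvFindSplit t cs).map (· + 1)

def nba_prefix_trail_alt (trail_ct : List (String × Int)) (t : Int) : List (String × Int) :=
  let times := trail_ct.map Prod.snd
  let cums := pvCumsFrom 0 times
  match pvFindSplit t cums with
  | none => trail_ct
  | some split =>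
    let total_before := cums.getD split 0 - times.getD split 0
    trail_ct.take split ++ [((trail_ct.getD split ("", 0)).1, t - total_before)]

-- ===== PRECONDITION & SPEC =====
def Spec_nba_prefix_trail (trail_ct : List (String × Int)) (t : Int) (out : List (String × Int)) : Prop := out = nba_prefix_trail_alt trail_ct t
instance (trail_ct : List (String × Int)) (t : Int) (out : List (String × Int)) : Decidable (Spec_nba_prefix_trail trail_ct t out) := by unfold Spec_nba_prefix_trail; infer_instance

-- ===== CLAIM (what is proved, stated in full; the proofs are below) =====
def Claim_equal_nba_prefix_trail : Prop := ∀ (trail_ct : List (String × Int)) (t : Int), Dom_nba_prefix_trail trail_ct t → Spec_nba_prefix_trail trail_ct t (nba_prefix_trail trail_ct t)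

-- ===== LEMMAS AND PROOFS =====
-- B's computation generalized over the starting offset s of the prefix sums
def pvAltFrom (trail_ct : List (String × Int)) (s t : Int) : List (String × Int) :=
  let times := trail_ct.map Prod.snd
  let cums := pvCumsFrom s times
  match pvFindSplit t cums with
  | none => trail_ct
  | some split =>
    trail_ct.take split ++ [((trail_ct.getD split ("", 0)).1, t - (cums.getD split 0 - times.getD split 0))]

theorem pvGoA_eq_altFrom (trail_ct : List (String × Int)) (s t : Int) :
    pvGoA trail_ct s t = pvAltFrom trail_ct s t := by
  induction trail_ct generalizing s with
  | nil => rfl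
  | cons hd rest ih =>
    obtain ⟨p, x⟩ := hd
    simp only [pvGoA, pvAltFrom, List.map_cons, pvCumsFrom, pvFindSplit]
    by_cases h : s + x < t
    · have hx : ¬ t ≤ s + x := by omega
      simp only [if_pos h, if_neg hx, ih (s + x)]
      simp only [pvAltFrom]
      cases hfs : pvFindSplit t (pvCumsFrom (s + x) (rest.map Prod.snd)) with
      | none => simp [hfs]
      | some j => simp [hfs]
    · have hx : t ≤ s + x := by omega
      simp only [if_neg h, if_pos hx]
      have : t - (s + x - x) = t - s := by ring
      simp [this]

-- ===== VERDICT (by name: the statement is the Claim_ definition above) =====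
theorem nba_prefix_trail_spec : Claim_equal_nba_prefix_trail := by
  intro trail_ct t _
  show pvGoA trail_ct 0 t = nba_prefix_trail_alt trail_ct t
  rw [pvGoA_eq_altFrom]
  rfl
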